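-- pv_equiv track=rewrite | github.com/calsci-io/calsci_vscode_extension | backend/calsci_backend.py | _split_helper_framed_text
-- ===== SOURCE A (Python) =====
-- HELPER_FRAME_PREFIX = "{{CALSCI_HYB:"
--
-- HELPER_FRAME_SUFFIX = "}}"
--
-- def _split_helper_framed_text(text: str) -> tuple[str, list[str], str]:
--     visible_parts: list[str] = []
--     frames: list[str] = []
--     scan = 0
--
--     while True:
--         start = text.find(HELPER_FRAME_PREFIX, scan)
--         if start < 0:
--             remainder = text[scan:]
--             overlap = _helper_frame_prefix_overlap(remainder)
--             if overlap > 0: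
--                 visible_parts.append(remainder[:-overlap])
--                 return "".join(visible_parts), frames, remainder[-overlap:]
--             visible_parts.append(remainder)
--             return "".join(visible_parts), frames, ""
--
--         visible_parts.append(text[scan:start])
--         end = _find_helper_frame_suffix(text, start + len(HELPER_FRAME_PREFIX))
--         if end < 0:
--             return "".join(visible_parts), frames, text[start:]
--
--         frames.append(text[start + len(HELPER_FRAME_PREFIX) : end])
--         scan = end + len(HELPER_FRAME_SUFFIX)
--
-- def _helper_frame_prefix_overlap(text: str) -> int:
--     if not text:
--         return 0
--
--     max_overlap = min(len(text), len(HELPER_FRAME_PREFIX) - 1)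
--     for overlap in range(max_overlap, 0, -1):
--         if HELPER_FRAME_PREFIX.startswith(text[-overlap:]):
--             return overlap
--     return 0
--
-- def _find_helper_frame_suffix(text: str, start: int) -> int:
--     search = start
--     while True:
--         end = text.find(HELPER_FRAME_SUFFIX, search)
--         if end < 0:
--             return -1
--
--         suffix_end = end + len(HELPER_FRAME_SUFFIX)
--         if suffix_end >= len(text) or text[suffix_end] == "\n":
--             return end
--
--         search = end + 1
-- ===== SOURCE B (Python) =====
-- # B: single left-to-right character automaton (one cursor, no find/overlap helpers);
-- # the pending tail falls out as "the remainder is a proper prefix of the marker".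
-- HELPER_FRAME_PREFIX = "{{CALSCI_HYB:"
--
--
-- def _close(text, j):
--     # first k >= j with text[k:k+2] == "}}" followed by newline or end of text
--     for k in range(j, len(text) - 1):
--         if text[k] == "}" and text[k + 1] == "}" and (k + 2 == len(text) or text[k + 2] == "\n"):
--             return k
--     return -1
--
--
-- def _split_helper_framed_text(text: str) -> tuple[str, list[str], str]:
--     visible = []
--     frames = []
--     i = 0
--     n = len(text)
--     while i < n:
--         if text.startswith(HELPER_FRAME_PREFIX, i):
--             j = i + len(HELPER_FRAME_PREFIX)
--             k = _close(text, j)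
--             if k < 0:
--                 return "".join(visible), frames, text[i:]
--             frames.append(text[j:k])
--             i = k + 2
--         elif n - i < len(HELPER_FRAME_PREFIX) and HELPER_FRAME_PREFIX.startswith(text[i:]):
--             return "".join(visible), frames, text[i:]
--         else:
--             visible.append(text[i])
--             i += 1
--     return "".join(visible), frames, ""
-- ===== Notes on version B (the rewrite author's own statement) =====
-- stated objective: simpler
-- what changed: A's find()-jumping scanner with three helpers (substring find, repeated suffix search, a descending tail-overlap loop) is replaced by a single left-to-right one-cursor character automaton: consume a frame when the marker starts here, stop when the remainder is a proper prefix of the marker (the pending tail), otherwise emit one visible character.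
import Mathlib
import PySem

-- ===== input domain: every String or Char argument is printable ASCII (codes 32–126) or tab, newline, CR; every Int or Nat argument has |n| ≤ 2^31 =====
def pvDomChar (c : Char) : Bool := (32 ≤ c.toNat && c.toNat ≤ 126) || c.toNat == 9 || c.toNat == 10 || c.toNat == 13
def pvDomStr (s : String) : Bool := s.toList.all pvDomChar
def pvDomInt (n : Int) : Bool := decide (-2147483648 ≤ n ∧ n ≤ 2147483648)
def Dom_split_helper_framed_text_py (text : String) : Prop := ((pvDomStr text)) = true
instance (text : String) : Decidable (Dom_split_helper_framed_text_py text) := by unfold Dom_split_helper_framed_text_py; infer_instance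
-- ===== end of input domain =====

-- B replaces A's find-and-jump scanner (three helpers: substring find, suffix search,
-- tail-overlap loop) by a single left-to-right character automaton; objective: simpler.

-- ===== PORT A =====
-- A's module constants HELPER_FRAME_PREFIX / HELPER_FRAME_SUFFIX
def pvP : List Char := "{{CALSCI_HYB:".toList
def pvS : List Char := "}}".toList

-- text.find(needle, s) for a NONEMPTY needle and 0 ≤ s: first index ≥ s where needle
-- occurs, else -1; hand-written (exact: for s > len(text) the prefix test on [] fails
-- for a nonempty needle, so -1 is returned, as in CPython).
-- (the fuel t.length + 1 - s is a pure totality guard: it cannot run out before the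
-- scan passes the end of the text, where find returns -1 anyway)
def pvFindSubGo (t nd : List Char) : Nat → Nat → Int
  | 0, _ => -1
  | fuel + 1, s =>
    if nd.isPrefixOf (t.drop s) then (s : Int)
    else if s < t.length then pvFindSubGo t nd fuel (s + 1) else -1

def pvFindSub (t : List Char) (nd : List Char) (s : Nat) : Int :=
  pvFindSubGo t nd (t.length + 1 - s) s

-- spec of pvFindSub when it succeeds (cited by the ports' termination proofs)
-- _find_helper_frame_suffix: first "}}" at/after `search` followed by '\n' or the end of text
def pvFindSuffixAGo (t : List Char) : Nat → Nat → Int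
  | 0, _ => -1
  | fuel + 1, search =>
    let e := pvFindSub t pvS search
    if e < 0 then -1
    else if t.length ≤ e.toNat + 2 ∨ t[e.toNat + 2]? = some '\n' then e
    else pvFindSuffixAGo t fuel (e.toNat + 1)

def pvFindSuffixA (t : List Char) (search : Nat) : Int :=
  pvFindSuffixAGo t (t.length + 1 - search) search

-- _helper_frame_prefix_overlap's descending for-loop (k counts down from min(len, 12));
-- text[-overlap:] = drop (length - overlap), exact since 0 < overlap ≤ length.
def pvOverlapLoop (t : List Char) : Nat → Nat
  | 0 => 0
  | k + 1 =>
    if (t.drop (t.length - (k + 1))).isPrefixOf pvP then k + 1 else pvOverlapLoop t k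

def pvOverlapA (t : List Char) : Nat :=
  if t = [] then 0 else pvOverlapLoop t (min t.length 12)

-- _split_helper_framed_text's main while-loop; visible_parts is kept as the already
-- joined character list (''.join of the appended parts = their concatenation).
-- Slices text[scan:start] / text[start+13:end] are take/drop (exact: bounds are
-- nonnegative and ordered here, as the termination proof shows).
def pvLoopAGo (t : List Char) :
    Nat → Nat → List Char → List String → String × List String × String
  | 0, scan, vis, frames =>
    -- fuel exhausted: the scan is past the end, i.e. find fails (the no-marker branch)
    let remainder := t.drop scan
    let ov := pvOverlapA remainder
    if 0 < ov then
      (String.ofList (vis ++ remainder.take (remainder.length - ov)), frames,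
        String.ofList (remainder.drop (remainder.length - ov)))
    else (String.ofList (vis ++ remainder), frames, "")
  | fuel + 1, scan, vis, frames =>
    let start := pvFindSub t pvP scan
    if start < 0 then
      let remainder := t.drop scan
      let ov := pvOverlapA remainder
      if 0 < ov then
        (String.ofList (vis ++ remainder.take (remainder.length - ov)), frames,
          String.ofList (remainder.drop (remainder.length - ov)))
      else (String.ofList (vis ++ remainder), frames, "")
    else
      let st := start.toNat
      let vis' := vis ++ (t.drop scan).take (st - scan)
      let e := pvFindSuffixA t (st + 13)
      if e < 0 then (String.ofList vis', frames, String.ofList (t.drop st))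
      else
        pvLoopAGo t fuel (e.toNat + 2) vis'
          (frames ++ [String.ofList ((t.drop (st + 13)).take (e.toNat - (st + 13)))])

def pvLoopA (t : List Char) (scan : Nat) (vis : List Char) (frames : List String) :
    String × List String × String :=
  pvLoopAGo t (t.length + 1 - scan) scan vis frames

def split_helper_framed_text_py (text : String) : String × List String × String :=
  pvLoopA text.toList 0 [] []

-- ===== PORT B =====
-- _close: scan one char at a time for "}}" followed by '\n' or the end; returns the
-- frame body before it and the rest after it.
def pvCloseB : List Char → Option (List Char × List Char)
  | c1 :: c2 :: rest =>
    if c1 = '}' ∧ c2 = '}' ∧ (rest = [] ∨ rest.head? = some '\n') then some ([], rest)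
    else
      match pvCloseB (c2 :: rest) with
      | some (f, r) => some (c1 :: f, r)
      | none => none
  | _ => none

-- cited by pvLoopB's termination proof
theorem pvCloseB_length : ∀ {x f r : List Char}, pvCloseB x = some (f, r) → r.length < x.length := by
  intro x
  induction x with
  | nil => intro f r h; simp [pvCloseB] at h
  | cons c1 x' ih =>
    cases x' with
    | nil => intro f r h; simp [pvCloseB] at h
    | cons c2 rest =>
      intro f r h
      rw [pvCloseB] at h
      by_cases hcond : c1 = '}' ∧ c2 = '}' ∧ (rest = [] ∨ rest.head? = some '\n')
      · rw [if_pos hcond] at h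
        simp only [Option.some.injEq, Prod.mk.injEq] at h
        obtain ⟨-, hr⟩ := h
        subst hr
        simp
      · rw [if_neg hcond] at h
        cases hm : pvCloseB (c2 :: rest) with
        | none => rw [hm] at h; simp at h
        | some p =>
          obtain ⟨f', r'⟩ := p
          rw [hm] at h
          simp only [Option.some.injEq, Prod.mk.injEq] at h
          obtain ⟨-, hr⟩ := h
          subst hr
          have := ih hm
          simp only [List.length_cons] at this ⊢
          omega

-- termination measure lemma for pvLoopB (cited by name in decreasing_by)
theorem pvLoopB_dec {c : Char} {rest f r : List Char}
    (hc : pvCloseB ((c :: rest).drop 13) = some (f, r)) : r.length < (c :: rest).length := by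
  have h := pvCloseB_length hc
  simp only [List.length_drop, List.length_cons] at h
  simp only [List.length_cons]
  omega

-- B's while-loop: one cursor, advanced a character at a time (the cursor is the
-- remaining list; text.startswith(PREFIX, i) is pvP.isPrefixOf on it).
def pvLoopB (l : List Char) (vis : List Char) (frames : List String) :
    String × List String × String :=
  match l with
  | [] => (String.ofList vis, frames, "")
  | c :: rest =>
    if hp : pvP.isPrefixOf (c :: rest) then
      match hc : pvCloseB ((c :: rest).drop 13) with
      | some (f, r) => pvLoopB r vis (frames ++ [String.ofList f])
      | none => (String.ofList vis, frames, String.ofList (c :: rest))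
    else if (c :: rest).length < 13 ∧ (c :: rest).isPrefixOf pvP then
      (String.ofList vis, frames, String.ofList (c :: rest))
    else pvLoopB rest (vis ++ [c]) frames
termination_by l.length
decreasing_by
  · exact pvLoopB_dec hc
  · exact Nat.lt_add_one _

def split_helper_framed_text_py_alt (text : String) : String × List String × String :=
  pvLoopB text.toList [] []

-- ===== PRECONDITION & SPEC =====
def Spec_split_helper_framed_text_py (text : String) (out : String × List String × String) : Prop := out = split_helper_framed_text_py_alt text
instance (text : String) (out : String × List String × String) : Decidable (Spec_split_helper_framed_text_py text out) := by unfold Spec_split_helper_framed_text_py; infer_instance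

-- ===== CLAIM (what is proved, stated in full; the proofs are below) =====
def Claim_equal_split_helper_framed_text_py : Prop := ∀ (text : String), Dom_split_helper_framed_text_py text → Spec_split_helper_framed_text_py text (split_helper_framed_text_py text)

-- ===== LEMMAS AND PROOFS =====

-- j is a valid close position in t: "}}" occurs at j and is followed by '\n' or the end
def pvValid (t : List Char) (j : Nat) : Prop :=
  pvS <+: t.drop j ∧ (t.length ≤ j + 2 ∨ t[j + 2]? = some '\n')

theorem pvS_ne_nil : pvS ≠ [] := by decide
theorem pvP_ne_nil : pvP ≠ [] := by decide

theorem prefix_drop_lt {t nd : List Char} {j : Nat} (h : nd <+: t.drop j) (hne : nd ≠ []) :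
    j + nd.length ≤ t.length := by
  have hl := h.length_le
  simp only [List.length_drop] at hl
  rcases Nat.lt_or_ge t.length j with hj | hj
  · rw [List.drop_eq_nil_of_le (Nat.le_of_lt hj)] at h
    exact absurd (List.prefix_nil.mp h) hne
  · omega

theorem pvFindSubGo_nonneg {t nd : List Char} : ∀ {fuel s : Nat},
    0 ≤ pvFindSubGo t nd fuel s →
    s ≤ (pvFindSubGo t nd fuel s).toNat ∧ nd <+: t.drop (pvFindSubGo t nd fuel s).toNat ∧
      ∀ i, s ≤ i → i < (pvFindSubGo t nd fuel s).toNat → ¬ nd <+: t.drop i := by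
  intro fuel
  induction fuel with
  | zero => intro s h; rw [pvFindSubGo] at h; omega
  | succ fuel ih =>
    intro s h
    rw [pvFindSubGo] at h ⊢
    by_cases hpre : nd.isPrefixOf (t.drop s)
    · rw [if_pos hpre] at h ⊢
      refine ⟨le_refl _, by simpa using hpre, by omega⟩
    · by_cases hlt : s < t.length
      · rw [if_neg hpre, if_pos hlt] at h ⊢
        obtain ⟨ih1, ih2, ih3⟩ := ih h
        refine ⟨by omega, ih2, ?_⟩
        intro i hi1 hi2
        rcases Nat.eq_or_lt_of_le hi1 with rfl | hi1'
        · simpa using hpre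
        · exact ih3 i hi1' hi2
      · rw [if_neg hpre, if_neg hlt] at h
        omega

theorem pvFindSub_nonneg {t nd : List Char} {s : Nat} (h : 0 ≤ pvFindSub t nd s) :
    s ≤ (pvFindSub t nd s).toNat ∧ nd <+: t.drop (pvFindSub t nd s).toNat ∧
      ∀ i, s ≤ i → i < (pvFindSub t nd s).toNat → ¬ nd <+: t.drop i := by
  unfold pvFindSub at h ⊢
  exact pvFindSubGo_nonneg h

theorem pvFindSubGo_neg {t nd : List Char} (hne : nd ≠ []) : ∀ {fuel s : Nat},
    t.length < s + fuel → pvFindSubGo t nd fuel s < 0 → ∀ j, s ≤ j → ¬ nd <+: t.drop j := by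
  intro fuel
  induction fuel with
  | zero =>
    intro s hs h j hj hpj
    have := prefix_drop_lt hpj hne
    have : nd.length = 0 := by omega
    exact hne (List.eq_nil_of_length_eq_zero this)
  | succ fuel ih =>
    intro s hs h j hj hpj
    rw [pvFindSubGo] at h
    by_cases hpre : nd.isPrefixOf (t.drop s)
    · rw [if_pos hpre] at h; omega
    · by_cases hlt : s < t.length
      · rw [if_neg hpre, if_pos hlt] at h
        rcases Nat.eq_or_lt_of_le hj with rfl | hj'
        · exact absurd (by simpa using hpj) hpre
        · exact ih (by omega) h j hj' hpj
      · rcases Nat.eq_or_lt_of_le hj with rfl | hj'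
        · exact absurd (by simpa using hpj) hpre
        · have hd : t.drop j = [] := List.drop_eq_nil_of_le (by omega)
          rw [hd] at hpj
          exact hne (List.prefix_nil.mp hpj)

theorem pvFindSub_neg {t nd : List Char} {s : Nat} (hne : nd ≠ [])
    (h : pvFindSub t nd s < 0) : ∀ j, s ≤ j → ¬ nd <+: t.drop j := by
  unfold pvFindSub at h
  exact pvFindSubGo_neg hne (by omega) h

theorem pvFindSuffixAGo_neg {t : List Char} : ∀ {fuel s : Nat}, t.length < s + fuel →
    pvFindSuffixAGo t fuel s < 0 → ∀ j, s ≤ j → ¬ pvValid t j := by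
  intro fuel
  induction fuel with
  | zero =>
    intro s hs h j hj hv
    have := prefix_drop_lt hv.1 pvS_ne_nil
    have hS : pvS.length = 2 := by decide
    omega
  | succ fuel ih =>
    intro s hs h j hj hv
    rw [pvFindSuffixAGo] at h
    by_cases he : pvFindSub t pvS s < 0
    · rw [if_pos he] at h
      exact pvFindSub_neg pvS_ne_nil he j hj hv.1
    · rw [if_neg he] at h
      obtain ⟨h1, h2, h3⟩ := pvFindSub_nonneg (le_of_not_gt he)
      have h4 := prefix_drop_lt h2 pvS_ne_nil
      have hS : pvS.length = 2 := by decide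
      by_cases hc : t.length ≤ (pvFindSub t pvS s).toNat + 2 ∨
          t[(pvFindSub t pvS s).toNat + 2]? = some '\n'
      · rw [if_pos hc] at h; omega
      · rw [if_neg hc] at h
        rcases Nat.lt_or_ge j ((pvFindSub t pvS s).toNat + 1) with hj2 | hj2
        · rcases Nat.lt_or_ge j ((pvFindSub t pvS s).toNat) with hj3 | hj3
          · exact h3 j hj hj3 hv.1
          · have : j = (pvFindSub t pvS s).toNat := by omega
            subst this
            exact hc hv.2
        · exact ih (by omega) h j hj2 hv

theorem pvFindSuffixA_neg {t : List Char} {s : Nat} (h : pvFindSuffixA t s < 0) :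
    ∀ j, s ≤ j → ¬ pvValid t j := by
  unfold pvFindSuffixA at h
  exact pvFindSuffixAGo_neg (by omega) h

theorem pvFindSuffixAGo_nonneg_spec {t : List Char} : ∀ {fuel s : Nat}, t.length < s + fuel →
    0 ≤ pvFindSuffixAGo t fuel s →
    s ≤ (pvFindSuffixAGo t fuel s).toNat ∧ pvValid t (pvFindSuffixAGo t fuel s).toNat ∧
      ∀ i, s ≤ i → i < (pvFindSuffixAGo t fuel s).toNat → ¬ pvValid t i := by
  intro fuel
  induction fuel with
  | zero => intro s hs h; rw [pvFindSuffixAGo] at h; omega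
  | succ fuel ih =>
    intro s hs h
    rw [pvFindSuffixAGo] at h ⊢
    by_cases he : pvFindSub t pvS s < 0
    · rw [if_pos he] at h; omega
    · rw [if_neg he] at h ⊢
      obtain ⟨h1, h2, h3⟩ := pvFindSub_nonneg (le_of_not_gt he)
      have h4 := prefix_drop_lt h2 pvS_ne_nil
      have hS : pvS.length = 2 := by decide
      by_cases hc : t.length ≤ (pvFindSub t pvS s).toNat + 2 ∨
          t[(pvFindSub t pvS s).toNat + 2]? = some '\n'
      · rw [if_pos hc] at h ⊢
        refine ⟨h1, ⟨h2, hc⟩, ?_⟩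
        intro i hi1 hi2
        exact fun hv => h3 i hi1 (by omega) hv.1
      · rw [if_neg hc] at h ⊢
        obtain ⟨ih1, ih2, ih3⟩ := ih (by omega) h
        refine ⟨by omega, ih2, ?_⟩
        intro i hi1 hi2 hv
        rcases Nat.lt_or_ge i ((pvFindSub t pvS s).toNat + 1) with hi3 | hi3
        · rcases Nat.lt_or_ge i ((pvFindSub t pvS s).toNat) with hi4 | hi4
          · exact h3 i hi1 hi4 hv.1
          · have : i = (pvFindSub t pvS s).toNat := by omega
            subst this
            exact hc hv.2
        · exact ih3 i hi3 hi2 hv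

theorem pvFindSuffixA_nonneg_spec {t : List Char} {s : Nat} (h : 0 ≤ pvFindSuffixA t s) :
    s ≤ (pvFindSuffixA t s).toNat ∧ pvValid t (pvFindSuffixA t s).toNat ∧
      ∀ i, s ≤ i → i < (pvFindSuffixA t s).toNat → ¬ pvValid t i := by
  unfold pvFindSuffixA at h ⊢
  exact pvFindSuffixAGo_nonneg_spec (by omega) h

theorem pvValid_drop {t : List Char} {s j : Nat} : pvValid (t.drop s) j ↔ pvValid t (s + j) := by
  unfold pvValid
  have hdd : (t.drop s).drop j = t.drop (s + j) := by rw [List.drop_drop, Nat.add_comm]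
  have hg : (t.drop s)[j + 2]? = t[s + j + 2]? := by
    rw [List.getElem?_drop, ← Nat.add_assoc]
  have hl : (t.drop s).length = t.length - s := List.length_drop ..
  rw [hdd, hg, hl]
  constructor
  · rintro ⟨a, b⟩
    refine ⟨a, ?_⟩
    rcases b with b | b
    · exact Or.inl (by omega)
    · exact Or.inr b
  · rintro ⟨a, b⟩
    refine ⟨a, ?_⟩
    rcases b with b | b
    · exact Or.inl (by omega)
    · exact Or.inr b

theorem pvValid_cons₂ {c1 c2 : Char} {rest : List Char} :
    pvValid (c1 :: c2 :: rest) 0 ↔ (c1 = '}' ∧ c2 = '}' ∧ (rest = [] ∨ rest.head? = some '\n')) := by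
  unfold pvValid
  have h1 : pvS <+: c1 :: c2 :: rest ↔ (c1 = '}' ∧ c2 = '}') := by
    show ['}', '}'] <+: _ ↔ _
    simp [List.cons_prefix_cons]
    constructor
    · rintro ⟨a, b⟩; exact ⟨a.symm, b.symm⟩
    · rintro ⟨a, b⟩; exact ⟨a.symm, b.symm⟩
  have h2 : (c1 :: c2 :: rest).length ≤ 0 + 2 ↔ rest = [] := by
    simp [List.length_cons]
  have h3 : (c1 :: c2 :: rest)[0 + 2]? = rest.head? := by
    simp [List.getElem?_cons_succ, List.head?_eq_getElem?]
  rw [List.drop_zero, h1, h2, h3]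
  tauto

theorem pvValid_cons_succ {c : Char} {y : List Char} {j : Nat} :
    pvValid (c :: y) (j + 1) ↔ pvValid y j := by
  have h := pvValid_drop (t := c :: y) (s := 1) (j := j)
  simp only [List.drop_one, List.tail_cons] at h
  rw [h, Nat.add_comm]

theorem pvCloseB_of_no_valid {x : List Char} (h : ∀ j, ¬ pvValid x j) : pvCloseB x = none := by
  induction x with
  | nil => simp [pvCloseB]
  | cons c1 x' ih =>
    cases x' with
    | nil => simp [pvCloseB]
    | cons c2 rest =>
      rw [pvCloseB]
      rw [if_neg (fun hc => h 0 (pvValid_cons₂.mpr hc))]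
      have : pvCloseB (c2 :: rest) = none :=
        ih (fun j hv => h (j + 1) (pvValid_cons_succ.mpr hv))
      rw [this]

theorem pvValid_two_le {x : List Char} {j : Nat} (h : pvValid x j) : j + 2 ≤ x.length := by
  have := prefix_drop_lt h.1 pvS_ne_nil
  have hS : pvS.length = 2 := by decide
  omega

theorem pvCloseB_of_min_valid {j : Nat} : ∀ {x : List Char}, pvValid x j →
    (∀ i, i < j → ¬ pvValid x i) → pvCloseB x = some (x.take j, x.drop (j + 2)) := by
  induction j with
  | zero =>
    intro x hv hmin
    have hlen := pvValid_two_le hv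
    match x with
    | c1 :: c2 :: rest =>
      rw [pvCloseB, if_pos (pvValid_cons₂.mp hv)]
      simp
  | succ j ih =>
    intro x hv hmin
    have hlen := pvValid_two_le hv
    match x with
    | c1 :: c2 :: rest =>
      rw [pvCloseB]
      rw [if_neg (fun hc => hmin 0 (by omega) (pvValid_cons₂.mpr hc))]
      have hrec := ih (x := c2 :: rest) (pvValid_cons_succ.mp hv)
        (fun i hi hvi => hmin (i + 1) (by omega) (pvValid_cons_succ.mpr hvi))
      rw [hrec]
      simp

-- overlap characterisation
theorem pvOverlapLoop_le (t : List Char) : ∀ k, pvOverlapLoop t k ≤ k := by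
  intro k
  induction k with
  | zero => simp [pvOverlapLoop]
  | succ k ih =>
    rw [pvOverlapLoop]
    split
    · exact le_refl _
    · omega

theorem pvOverlapLoop_prefix (t : List Char) : ∀ {k}, 0 < pvOverlapLoop t k →
    (t.drop (t.length - pvOverlapLoop t k)) <+: pvP := by
  intro k
  induction k with
  | zero => simp [pvOverlapLoop]
  | succ k ih =>
    rw [pvOverlapLoop]
    split
    · intro _
      rw [← List.isPrefixOf_iff_prefix]
      assumption
    · exact ih

theorem pvOverlapLoop_max (t : List Char) : ∀ {k k'}, 0 < k' → k' ≤ k →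
    (t.drop (t.length - k')) <+: pvP → k' ≤ pvOverlapLoop t k := by
  intro k
  induction k with
  | zero => intro k' h1 h2 _; omega
  | succ k ih =>
    intro k' h1 h2 h3
    rw [pvOverlapLoop]
    split
    · exact h2
    · rcases Nat.eq_or_lt_of_le h2 with rfl | h2'
      · rename_i hc
        rw [← List.isPrefixOf_iff_prefix] at h3
        exact absurd h3 hc
      · exact ih h1 (by omega) h3

theorem pvOverlap_le (t : List Char) : pvOverlapA t ≤ min t.length 12 := by
  unfold pvOverlapA
  split
  · omega
  · exact pvOverlapLoop_le t _

theorem pvOverlap_prefix {t : List Char} (h : 0 < pvOverlapA t) :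
    (t.drop (t.length - pvOverlapA t)) <+: pvP := by
  unfold pvOverlapA at h ⊢
  split at h
  · omega
  · rw [if_neg (by assumption)]
    exact pvOverlapLoop_prefix t h

theorem pvOverlap_max {t : List Char} {k : Nat} (h0 : 0 < k) (h1 : k ≤ t.length) (h2 : k ≤ 12)
    (h3 : (t.drop (t.length - k)) <+: pvP) : k ≤ pvOverlapA t := by
  unfold pvOverlapA
  split
  · rename_i ht
    subst ht
    simp at h1 h0
    omega
  · exact pvOverlapLoop_max t h0 (by omega) h3

-- loopB on a marker-free list = visible prefix + pending overlap tail
theorem pvP_length : pvP.length = 13 := by decide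

-- the overlap of c :: rest equals the overlap of rest when c :: rest is prefix of neither side
theorem pvOverlap_cons {c : Char} {rest : List Char} (h0 : ¬ pvP <+: (c :: rest))
    (hsub : ¬ (c :: rest) <+: pvP) : pvOverlapA (c :: rest) = pvOverlapA rest ∧
      pvOverlapA rest ≤ rest.length := by
  have hler := pvOverlap_le rest
  have hlec := pvOverlap_le (c :: rest)
  have hlen : (c :: rest).length = rest.length + 1 := by simp
  have hcr : pvOverlapA (c :: rest) ≤ rest.length := by
    by_cases hpos : 0 < pvOverlapA (c :: rest)
    · rcases Nat.lt_or_ge (pvOverlapA (c :: rest)) (rest.length + 1) with hlt | hge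
      · omega
      · have : pvOverlapA (c :: rest) = rest.length + 1 := by omega
        have hp := pvOverlap_prefix hpos
        rw [this, hlen] at hp
        simp at hp
        exact absurd hp hsub
    · omega
  refine ⟨le_antisymm ?_ ?_, by omega⟩
  · by_cases hpos : 0 < pvOverlapA (c :: rest)
    · have hp := pvOverlap_prefix hpos
      have hdr : (c :: rest).drop ((c :: rest).length - pvOverlapA (c :: rest)) =
          rest.drop (rest.length - pvOverlapA (c :: rest)) := by
        rw [hlen, show rest.length + 1 - pvOverlapA (c :: rest) =
          (rest.length - pvOverlapA (c :: rest)) + 1 by omega]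
        simp
      rw [hdr] at hp
      exact pvOverlap_max hpos hcr (by omega) hp
    · omega
  · by_cases hpos : 0 < pvOverlapA rest
    · have hp := pvOverlap_prefix hpos
      have hdr : rest.drop (rest.length - pvOverlapA rest) =
          (c :: rest).drop ((c :: rest).length - pvOverlapA rest) := by
        rw [hlen, show rest.length + 1 - pvOverlapA rest =
          (rest.length - pvOverlapA rest) + 1 by omega]
        simp
      rw [hdr] at hp
      exact pvOverlap_max hpos (by omega) (by omega) hp
    · omega

theorem pvLoopB_no_occ : ∀ {l : List Char} {vis frames}, (∀ j, ¬ pvP <+: l.drop j) →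
    pvLoopB l vis frames =
      (String.ofList (vis ++ l.take (l.length - pvOverlapA l)), frames,
        String.ofList (l.drop (l.length - pvOverlapA l))) := by
  intro l
  induction l with
  | nil => intro vis frames h; simp [pvLoopB, pvOverlapA]
  | cons c rest ih =>
    intro vis frames h
    have h0 : ¬ pvP <+: (c :: rest) := by simpa using h 0
    rw [pvLoopB, dif_neg (fun hb => h0 (List.isPrefixOf_iff_prefix.mp hb))]
    by_cases hsub : (c :: rest).isPrefixOf pvP
    · have hsub' := List.isPrefixOf_iff_prefix.mp hsub
      have hle := pvOverlap_le (c :: rest)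
      have hlen13 : (c :: rest).length ≤ 12 := by
        have hl := hsub'.length_le
        rw [pvP_length] at hl
        rcases Nat.lt_or_ge (c :: rest).length 13 with hlt | hge
        · rcases Nat.lt_or_ge (c :: rest).length 12 with h12 | h12
          · omega
          · omega
        · have : (c :: rest).length = pvP.length := by rw [pvP_length]; omega
          have := hsub'.eq_of_length this
          exact (h0 (by rw [this])).elim
      rw [if_pos ⟨by omega, hsub⟩]
      have hov : pvOverlapA (c :: rest) = (c :: rest).length := by
        have := pvOverlap_max (t := c :: rest) (k := (c :: rest).length)
          (by simp) (le_refl _) hlen13 (by simpa using hsub')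
        omega
      rw [hov]
      simp
    · rw [if_neg (fun hand => hsub hand.2)]
      have hsub' : ¬ (c :: rest) <+: pvP := fun hp => hsub (List.isPrefixOf_iff_prefix.mpr hp)
      obtain ⟨hove, hler⟩ := pvOverlap_cons h0 hsub'
      have hrec := @ih (vis ++ [c]) frames (fun j => by have := h (j + 1); simpa using this)
      rw [hrec, hove]
      have htk : (c :: rest).take ((c :: rest).length - pvOverlapA rest) =
          c :: rest.take (rest.length - pvOverlapA rest) := by
        rw [show (c :: rest).length - pvOverlapA rest =
          (rest.length - pvOverlapA rest) + 1 by simp; omega]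
        simp
      have hdp : (c :: rest).drop ((c :: rest).length - pvOverlapA rest) =
          rest.drop (rest.length - pvOverlapA rest) := by
        rw [show (c :: rest).length - pvOverlapA rest =
          (rest.length - pvOverlapA rest) + 1 by simp; omega]
        simp
      rw [htk, hdp]
      simp

-- loopB shifts over k marker-free, non-tail positions
theorem pvLoopB_shift {k : Nat} : ∀ {l : List Char} {vis frames},
    (∀ i, i < k → ¬ pvP <+: l.drop i) → (∀ i, i < k → ¬ (l.drop i) <+: pvP) → k ≤ l.length →
    pvLoopB l vis frames = pvLoopB (l.drop k) (vis ++ l.take k) frames := by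
  induction k with
  | zero => intro l vis frames _ _ _; simp
  | succ k ih =>
    intro l vis frames h1 h2 hk
    match l with
    | [] => simp at hk
    | c :: rest =>
      have ha : ¬ pvP.isPrefixOf (c :: rest) = true := fun hb =>
        h1 0 (by omega) (by simpa using List.isPrefixOf_iff_prefix.mp hb)
      have hbb : ¬ ((c :: rest).length < 13 ∧ (c :: rest).isPrefixOf pvP = true) := fun hb =>
        h2 0 (by omega) (by simpa using List.isPrefixOf_iff_prefix.mp hb.2)
      rw [pvLoopB, dif_neg ha, if_neg hbb]
      have hrec := @ih rest (vis ++ [c]) frames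
        (fun i hi => by have := h1 (i + 1) (by omega); simpa using this)
        (fun i hi => by have := h2 (i + 1) (by omega); simpa using this)
        (by have := hk; simp at this ⊢; omega)
      rw [hrec]
      simp

theorem pvLoopAGo_eq (t : List Char) : ∀ fuel scan vis frames, t.length < scan + fuel →
    pvLoopAGo t fuel scan vis frames = pvLoopB (t.drop scan) vis frames := by
  intro fuel
  induction fuel with
  | zero =>
    intro scan vis frames hs
    have hd : t.drop scan = [] := List.drop_eq_nil_of_le (by omega)
    rw [pvLoopAGo, hd]
    simp [pvOverlapA, pvLoopB]
  | succ fuel ih =>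
    intro scan vis frames hs
    rw [pvLoopAGo]
    by_cases hstart : pvFindSub t pvP scan < 0
    · rw [if_pos hstart]
      have hno : ∀ j, ¬ pvP <+: (t.drop scan).drop j := fun j hpj =>
        pvFindSub_neg pvP_ne_nil hstart (scan + j) (by omega) (by rwa [List.drop_drop] at hpj)
      rw [pvLoopB_no_occ hno]
      by_cases hov : 0 < pvOverlapA (t.drop scan)
      · rw [if_pos hov]
      · rw [if_neg hov]
        have h0 : pvOverlapA (t.drop scan) = 0 := by omega
        rw [h0]
        simp only [Nat.sub_zero]
        rw [List.take_length, List.drop_length]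
    · rw [if_neg hstart]
      obtain ⟨h1, h2, h3⟩ := pvFindSub_nonneg (le_of_not_gt hstart)
      have hstlen : (pvFindSub t pvP scan).toNat + 13 ≤ t.length := by
        have := prefix_drop_lt h2 pvP_ne_nil
        rwa [pvP_length] at this
      set st := (pvFindSub t pvP scan).toNat with hstdef
      have hshift : pvLoopB (t.drop scan) vis frames
          = pvLoopB (t.drop st) (vis ++ (t.drop scan).take (st - scan)) frames := by
        have hb := pvLoopB_shift (k := st - scan) (l := t.drop scan) (vis := vis)
          (frames := frames)
          (fun i hi hp => h3 (scan + i) (by omega) (by omega)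
            (by rwa [List.drop_drop] at hp))
          (fun i hi hp => by
            have hl := hp.length_le
            rw [List.length_drop, List.length_drop, pvP_length] at hl
            omega)
          (by rw [List.length_drop]; omega)
        rwa [List.drop_drop, show scan + (st - scan) = st by omega] at hb
      rw [hshift]
      cases hdrop : t.drop st with
      | nil =>
        exfalso
        have : (t.drop st).length = 0 := by rw [hdrop]; rfl
        rw [List.length_drop] at this
        omega
      | cons c r' =>
        have hppre : pvP.isPrefixOf (c :: r') = true := by
          rw [← hdrop]
          exact List.isPrefixOf_iff_prefix.mpr h2
        have hd13 : (c :: r').drop 13 = t.drop (st + 13) := by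
          rw [← hdrop, List.drop_drop, Nat.add_comm]
        rw [pvLoopB, dif_pos hppre]
        by_cases he : pvFindSuffixA t (st + 13) < 0
        · rw [if_pos he]
          have hnone : pvCloseB ((c :: r').drop 13) = none := by
            rw [hd13]
            apply pvCloseB_of_no_valid
            intro j hv
            exact pvFindSuffixA_neg he (st + 13 + j) (by omega) (pvValid_drop.mp hv)
          split
          · rename_i f r hcB
            rw [hnone] at hcB
            cases hcB
          · rw [hdrop]
        · rw [if_neg he]
          obtain ⟨hs1, hs2, hs3⟩ := pvFindSuffixA_nonneg_spec (le_of_not_gt he)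
          set en := (pvFindSuffixA t (st + 13)).toNat with hendef
          have hen2 : en + 2 ≤ t.length := pvValid_two_le hs2
          have hval : pvValid (t.drop (st + 13)) (en - (st + 13)) := by
            rw [pvValid_drop, show st + 13 + (en - (st + 13)) = en by omega]
            exact hs2
          have hmin : ∀ i, i < en - (st + 13) → ¬ pvValid (t.drop (st + 13)) i :=
            fun i hi hv => hs3 (st + 13 + i) (by omega) (by omega) (pvValid_drop.mp hv)
          have hsome : pvCloseB ((c :: r').drop 13) =
              some ((t.drop (st + 13)).take (en - (st + 13)),
                (t.drop (st + 13)).drop (en - (st + 13) + 2)) := by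
            rw [hd13]
            exact pvCloseB_of_min_valid hval hmin
          have hdd2 : (t.drop (st + 13)).drop (en - (st + 13) + 2) = t.drop (en + 2) := by
            rw [List.drop_drop, show st + 13 + (en - (st + 13) + 2) = en + 2 by omega]
          split
          · rename_i f r hcB
            rw [hsome] at hcB
            simp only [Option.some.injEq, Prod.mk.injEq] at hcB
            obtain ⟨hf, hr⟩ := hcB
            subst hf
            subst hr
            rw [hdd2]
            exact ih (en + 2) (vis ++ (t.drop scan).take (st - scan))
              (frames ++ [String.ofList ((t.drop (st + 13)).take (en - (st + 13)))])
              (by omega)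
          · rename_i hcB
            rw [hsome] at hcB
            cases hcB

theorem pvLoop_eq (t : List Char) : ∀ scan vis frames,
    pvLoopA t scan vis frames = pvLoopB (t.drop scan) vis frames := by
  intro scan vis frames
  unfold pvLoopA
  exact pvLoopAGo_eq t _ scan vis frames (by omega)

-- ===== VERDICT (by name: the statement is the Claim_ definition above) =====
theorem split_helper_framed_text_py_spec : Claim_equal_split_helper_framed_text_py := by
  intro text _
  unfold Spec_split_helper_framed_text_py split_helper_framed_text_py split_helper_framed_text_py_alt
  simpa using pvLoop_eq text.toList 0 [] []
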